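-- pv_equiv track=rewrite | github.com/sepal-contrib/se.plan | component/widget/expression.py | rename_benefits
-- ===== SOURCE A (Python) =====
-- def rename_benefits(item_list):
--     unique_items = {}
--     output_list = []
--     alphabet = "abcdefghijklmnopqrstuvwxyz"
--     current_index = 0  # Start at the first letter of the alphabet
--
--     for item in item_list:
--         if item not in unique_items:
--             # Assign a new letter from the alphabet to new items
--             unique_items[item] = alphabet[current_index]
--             current_index += 1  # Move to the next letter for the next new item
--         # Append the assigned letter to the output list
--         output_list.append(unique_items[item])
--
--     return output_list
-- ===== SOURCE B (Python) =====
-- def rename_benefits(item_list):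
--     alphabet = "abcdefghijklmnopqrstuvwxyz"
--     return [alphabet[len(set(item_list[:item_list.index(item)]))] for item in item_list]
-- ===== Notes on version B (the rewrite author's own statement) =====
-- stated objective: alternative
-- what changed: Eliminates A's dict and running counter entirely: each element's letter is computed independently as alphabet[len(set(prefix before its first occurrence))], a stateless per-element index/slice/set computation instead of one stateful accumulating pass; it trades linear time for quadratic.
import Mathlib
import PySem

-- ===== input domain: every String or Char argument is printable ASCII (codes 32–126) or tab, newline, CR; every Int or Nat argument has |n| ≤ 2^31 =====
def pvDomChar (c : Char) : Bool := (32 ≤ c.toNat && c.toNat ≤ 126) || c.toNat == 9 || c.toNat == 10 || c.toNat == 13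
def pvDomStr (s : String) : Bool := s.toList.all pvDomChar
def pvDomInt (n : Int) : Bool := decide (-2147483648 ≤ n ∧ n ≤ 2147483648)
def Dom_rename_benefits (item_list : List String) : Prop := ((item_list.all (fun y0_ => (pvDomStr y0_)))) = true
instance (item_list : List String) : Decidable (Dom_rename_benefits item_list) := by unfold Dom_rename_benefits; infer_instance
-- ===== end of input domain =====

-- B drops A's dict and running counter: each element's letter is computed independently as
-- alphabet[len(set(prefix before its first occurrence))] via index/slice/set; alternative, no speed claim.


-- ===== PORT A =====
-- one fold over the items carrying (unique_items, current_index, output_list);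
-- alphabet[current_index] is PySem.Str.pyGet? totalized with "" — never used inside Pre_ (Python raises IndexError there)
def rename_benefits (item_list : List String) : List String :=
  let alphabet := "abcdefghijklmnopqrstuvwxyz"
  (item_list.foldl
    (fun (st : PySem.Dict String String × Int × List String) item =>
      let u := st.1
      let ci := st.2.1
      let out := st.2.2
      let (u', ci') :=
        if u.contains item = false then
          (u.insert item (((PySem.Str.pyGet? alphabet ci).map (fun c => String.ofList [c])).getD ""), ci + 1)
        else (u, ci)
      (u', ci', out ++ [u'.getD item ""]))
    (PySem.Dict.mk [], 0, [])).2.2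

-- ===== PORT B =====
-- one map: for each item, slice the list up to item_list.index(item) (index never fails: item ∈ item_list,
-- so .getD 0 is never taken), take the set of that prefix, and index the alphabet by its size;
-- alphabet[k] totalized with "" — in range inside Pre_ (Python raises IndexError outside)
def rename_benefits_alt (item_list : List String) : List String :=
  let alphabet := "abcdefghijklmnopqrstuvwxyz"
  item_list.map (fun item =>
    ((PySem.Str.pyGet? alphabet
        (((PySem.Set.ofList (PySem.List.slice item_list none
            (some (((PySem.List.index? item_list item).getD 0 : Nat) : Int)))).length : Nat) : Int)
      ).map (fun c => String.ofList [c])).getD "")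

-- ===== PRECONDITION & SPEC =====
-- Pre_ excludes exactly the inputs with more than 26 distinct items, on which Python A (and B) raises IndexError
def Pre_rename_benefits (item_list : List String) : Prop :=
  (PySem.List.dedup item_list).length ≤ 26
instance (item_list : List String) : Decidable (Pre_rename_benefits item_list) := by
  unfold Pre_rename_benefits; infer_instance
def pvWitness_rename_benefits : List String := ["soil", "water", "soil", "air"]

def Spec_rename_benefits (item_list : List String) (out : List String) : Prop := out = rename_benefits_alt item_list
instance (item_list : List String) (out : List String) : Decidable (Spec_rename_benefits item_list out) := by unfold Spec_rename_benefits; infer_instance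

-- ===== CLAIM (what is proved, stated in full; the proofs are below) =====
def Claim_equal_rename_benefits : Prop := ∀ (item_list : List String), Dom_rename_benefits item_list → Pre_rename_benefits item_list → Spec_rename_benefits item_list (rename_benefits item_list)

-- ===== LEMMAS AND PROOFS =====

-- the letter assigned at position i of the alphabet (totalized form used by both ports)
def letterI (i : Int) : String :=
  ((PySem.Str.pyGet? "abcdefghijklmnopqrstuvwxyz" i).map (fun c => String.ofList [c])).getD ""

-- folding PySem.Set.add only appends: the accumulator is a prefix of the result
lemma foldl_add_prefix (t seen : List String) :
    ∃ r, t.foldl PySem.Set.add seen = seen ++ r := by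
  induction t generalizing seen with
  | nil => exact ⟨[], by simp⟩
  | cons a t ih =>
    simp only [List.foldl_cons, PySem.Set.add]
    split
    · exact ih seen
    · obtain ⟨r, hr⟩ := ih (seen ++ [a])
      exact ⟨[a] ++ r, by simp [hr]⟩

-- A's loop invariant: if the dict holds exactly the letters of the already-seen uniques,
-- the fold appends the letters indexed in the final unique list
lemma A_loop (l : List String) : ∀ (d : PySem.Dict String String) (seen out : List String),
    (∀ x, d.get? x = if x ∈ seen then some (letterI ((seen.idxOf x : Nat) : Int)) else none) →
    (l.foldl
      (fun (st : PySem.Dict String String × Int × List String) item =>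
        let u := st.1
        let ci := st.2.1
        let out := st.2.2
        let (u', ci') :=
          if u.contains item = false then
            (u.insert item (((PySem.Str.pyGet? "abcdefghijklmnopqrstuvwxyz" ci).map (fun c => String.ofList [c])).getD ""), ci + 1)
          else (u, ci)
        (u', ci', out ++ [u'.getD item ""]))
      (d, (seen.length : Int), out)).2.2
    = out ++ l.map (fun x => letterI (((l.foldl PySem.Set.add seen).idxOf x : Nat) : Int)) := by
  induction l with
  | nil => intro d seen out _; simp
  | cons a t ih =>
    intro d seen out hd
    simp only [List.foldl_cons]
    by_cases hmem : a ∈ seen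
    · -- already seen: dict and counter unchanged
      have hc : d.contains a = true := by
        rw [PySem.Dict.contains_eq_isSome_get?, hd a]
        simp [hmem]
      have hadd : PySem.Set.add seen a = seen := by
        simp [PySem.Set.add, hmem]
      have hgetD : d.getD a "" = letterI ((seen.idxOf a : Nat) : Int) := by
        rw [PySem.Dict.getD_eq_get?_getD, hd a]
        simp [hmem]
      simp only [hc, Bool.true_eq_false, if_false, hgetD]
      rw [ih d seen _ hd]
      obtain ⟨r, hr⟩ := foldl_add_prefix t seen
      simp only [List.map_cons, hadd, hr, List.idxOf_append, hmem, if_true]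
      simp
    · -- new item: insert with the next letter
      have hc : d.contains a = false := by
        rw [PySem.Dict.contains_eq_isSome_get?, hd a]
        simp [hmem]
      have hadd : PySem.Set.add seen a = seen ++ [a] := by
        simp [PySem.Set.add, hmem]
      have hd' : ∀ x, (d.insert a (letterI (seen.length : Int))).get? x =
          if x ∈ seen ++ [a] then some (letterI (((seen ++ [a]).idxOf x : Nat) : Int)) else none := by
        intro x
        rw [PySem.Dict.get?_insert, hd x]
        by_cases hxa : x = a
        · subst hxa
          simp [List.idxOf_append, hmem]
        · by_cases hxs : x ∈ seen
          · simp [hxa, hxs, List.idxOf_append]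
          · simp [hxa, hxs]
      have hlen : (seen.length : Int) + 1 = (((seen ++ [a]).length : Nat) : Int) := by
        simp
      simp only [hc, if_true]
      rw [show ((Option.map (fun c => String.ofList [c])
            (PySem.Str.pyGet? "abcdefghijklmnopqrstuvwxyz" (seen.length : Int))).getD "")
          = letterI (seen.length : Int) from rfl]
      rw [hlen, ih _ (seen ++ [a]) _ hd']
      have hgetD : (d.insert a (letterI (seen.length : Int))).getD a "" = letterI (seen.length : Int) := by
        rw [PySem.Dict.getD_eq_get?_getD, PySem.Dict.get?_insert]
        simp
      rw [hgetD]
      obtain ⟨r, hr⟩ := foldl_add_prefix t (seen ++ [a])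
      have hidx : ((t.foldl PySem.Set.add (seen ++ [a])).idxOf a) = seen.length := by
        rw [hr, List.append_assoc, List.idxOf_append]
        simp [hmem]
      simp only [List.map_cons, hadd, hidx]
      simp

-- the core index identity: a member's index in the ordered dedup equals the number of
-- distinct items in the prefix of the list before its first occurrence
lemma idxOf_dedup_eq (l : List String) (x : String) (hx : x ∈ l) :
    (PySem.List.dedup l).idxOf x
      = (PySem.Set.ofList (l.take ((PySem.List.index? l x).getD 0))).length := by
  have hsome : (PySem.List.index? l x).isSome := (PySem.List.index?_isSome_iff l x).mpr hx
  obtain ⟨k, hk⟩ := Option.isSome_iff_exists.mp hsome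
  obtain ⟨pre, suf, hl, hlen, hpre⟩ := (PySem.List.index?_eq_some_iff l x k).mp hk
  subst hl
  rw [hk]
  simp only [Option.getD_some]
  have htake : (pre ++ x :: suf).take k = pre := by
    rw [← hlen, List.take_left]
  rw [htake]
  -- dedup (pre ++ x :: suf) = ofList pre ++ [x] ++ r with x ∉ ofList pre
  have hdd : PySem.List.dedup (pre ++ x :: suf)
      = (x :: suf).foldl PySem.Set.add (PySem.Set.ofList pre) := by
    simp [PySem.List.dedup_eq_ofList, PySem.Set.ofList_eq_foldl, List.foldl_append]
  have hxpre : x ∉ PySem.Set.ofList pre := by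
    rw [PySem.Set.mem_ofList]; exact hpre
  have hadd : PySem.Set.add (PySem.Set.ofList pre) x = PySem.Set.ofList pre ++ [x] := by
    simp [PySem.Set.add, PySem.Set.contains]
    intro h; exact absurd h hpre
  obtain ⟨r, hr⟩ := foldl_add_prefix suf (PySem.Set.ofList pre ++ [x])
  rw [hdd]
  simp only [List.foldl_cons, hadd, hr]
  rw [List.append_assoc, List.idxOf_append]
  simp [hxpre]

-- ===== VERDICT (by name: the statement is the Claim_ definition above) =====
theorem rename_benefits_spec : Claim_equal_rename_benefits := by
  intro l _ _
  unfold Spec_rename_benefits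
  have hA := A_loop l (PySem.Dict.mk []) [] [] (by
    intro x
    simp [PySem.Dict.get?])
  simp only [List.length_nil, Nat.cast_zero, List.nil_append] at hA
  unfold rename_benefits rename_benefits_alt
  simp only []
  rw [hA]
  apply List.map_congr_left
  intro x hx
  have hdd : l.foldl PySem.Set.add [] = PySem.List.dedup l := by
    simp [PySem.List.dedup_eq_ofList, PySem.Set.ofList_eq_foldl]
  rw [hdd, idxOf_dedup_eq l x hx,
      PySem.List.slice_to_natCast]
  rfl
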